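-- pv_equiv track=rewrite | github.com/joewin319/lab2 | module_lab2.py | RLencode
-- ===== SOURCE A (Python) =====
-- def RLencode(vec):
--     tuppleList = None
--     # Your code
--     tuppleList=[]
--     count=0
--     for i in vec[:-1]:
--         if i==0:
--             count=count+1
--         else:
--             tuppleList.append((count,i))
--             count=0
--     if vec[-1]==0:
--         tuppleList.append((0,0))
--     else:
--         tuppleList.append((count,vec[-1]))
--
--     return tuppleList
-- ===== SOURCE B (Python) =====
-- def RLencode(vec):
--     prefix = vec[:-1]
--     nz = [(i, x) for i, x in enumerate(prefix) if x != 0]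
--     out = []
--     prev = -1
--     for i, x in nz:
--         out.append((i - prev - 1, x))
--         prev = i
--     last = vec[-1]
--     if last == 0:
--         out.append((0, 0))
--     else:
--         out.append((len(prefix) - prev - 1, last))
--     return out
-- ===== Notes on version B (the rewrite author's own statement) =====
-- stated objective: alternative
-- what changed: Replaces the incremental zero-counter fold with an index-table pass: collect (index, value) of nonzero prefix elements, then emit each zero-count as a gap between consecutive nonzero indices, finishing with the same last-element rule.
import Mathlib
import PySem

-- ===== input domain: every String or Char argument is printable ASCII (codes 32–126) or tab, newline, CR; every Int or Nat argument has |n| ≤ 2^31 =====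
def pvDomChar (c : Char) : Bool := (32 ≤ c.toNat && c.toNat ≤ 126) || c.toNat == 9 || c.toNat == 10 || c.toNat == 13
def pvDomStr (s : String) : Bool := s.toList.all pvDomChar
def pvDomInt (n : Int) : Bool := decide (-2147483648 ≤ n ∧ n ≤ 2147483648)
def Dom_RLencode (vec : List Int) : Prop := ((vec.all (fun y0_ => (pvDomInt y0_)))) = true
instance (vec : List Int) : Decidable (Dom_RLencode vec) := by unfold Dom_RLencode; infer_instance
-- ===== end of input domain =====

-- B replaces A's running zero-counter with an index-table-then-gaps pass (alternative decomposition, same cost).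

-- ===== PORT A =====
def RLencode (vec : List Int) : List (Int × Int) :=
  let st := (PySem.List.slice vec none (some (-1))).foldl
    (fun (acc : List (Int × Int) × Int) i =>
      if i == 0 then (acc.1, acc.2 + 1) else (acc.1 ++ [(acc.2, i)], 0)) ([], 0)
  match PySem.List.pyGet? vec (-1) with
  | none => []   -- IndexError on empty vec; excluded by Pre_RLencode
  | some last => if last == 0 then st.1 ++ [((0 : Int), (0 : Int))] else st.1 ++ [(st.2, last)]

-- ===== PORT B =====
-- helper: Python's enumerate, starting at k
def pvEnumFrom (k : Nat) : List Int → List (Nat × Int)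
  | [] => []
  | x :: xs => (k, x) :: pvEnumFrom (k + 1) xs

def RLencode_alt (vec : List Int) : List (Int × Int) :=
  let pre := PySem.List.slice vec none (some (-1))
  let nz := (pvEnumFrom 0 pre).filter (fun q => q.2 != 0)
  let st := nz.foldl
    (fun (a : List (Int × Int) × Int) q => (a.1 ++ [((q.1 : Int) - a.2 - 1, q.2)], (q.1 : Int)))
    ([], -1)
  match PySem.List.pyGet? vec (-1) with
  | none => []   -- IndexError on empty vec; excluded by Pre_RLencode
  | some last =>
    if last == 0 then st.1 ++ [((0 : Int), (0 : Int))]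
    else st.1 ++ [((pre.length : Int) - st.2 - 1, last)]

-- ===== PRECONDITION & SPEC =====
-- Pre_ excludes only the empty list, on which A raises IndexError (vec[-1]); B raises there too.
def Pre_RLencode (vec : List Int) : Prop := vec ≠ []
instance (vec : List Int) : Decidable (Pre_RLencode vec) := by unfold Pre_RLencode; infer_instance
def pvWitness_RLencode : List Int := [0, 3, 0]

def Spec_RLencode (vec : List Int) (out : List (Int × Int)) : Prop := out = RLencode_alt vec
instance (vec : List Int) (out : List (Int × Int)) : Decidable (Spec_RLencode vec out) := by unfold Spec_RLencode; infer_instance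

-- ===== CLAIM (what is proved, stated in full; the proofs are below) =====
def Claim_equal_RLencode : Prop := ∀ (vec : List Int), Dom_RLencode vec → Pre_RLencode vec → Spec_RLencode vec (RLencode vec)

-- ===== LEMMAS AND PROOFS =====

def pvStepA (acc : List (Int × Int) × Int) (i : Int) : List (Int × Int) × Int :=
  if i == 0 then (acc.1, acc.2 + 1) else (acc.1 ++ [(acc.2, i)], 0)

def pvStepB (a : List (Int × Int) × Int) (q : Nat × Int) : List (Int × Int) × Int :=
  (a.1 ++ [((q.1 : Int) - a.2 - 1, q.2)], (q.1 : Int))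

lemma pvKey (l : List Int) (k : Nat) (acc : List (Int × Int)) (p : Int) :
    l.foldl pvStepA (acc, (k : Int) - p - 1)
      = ((((pvEnumFrom k l).filter (fun q => q.2 != 0)).foldl pvStepB (acc, p)).1,
         ((k : Int) + l.length)
           - (((pvEnumFrom k l).filter (fun q => q.2 != 0)).foldl pvStepB (acc, p)).2 - 1) := by
  induction l generalizing k acc p with
  | nil => simp [pvEnumFrom]
  | cons x xs ih =>
    by_cases hx : x = 0
    · subst hx
      simp only [List.foldl_cons, pvStepA, pvEnumFrom, List.filter_cons]
      norm_num
      have h1 : ((k : Int) - p) = ((k + 1 : Nat) : Int) - p - 1 := by push_cast; ring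
      rw [h1, ih]
      simp only [Prod.mk.injEq]
      exact ⟨trivial, by push_cast [List.length_cons]; ring⟩
    · have hx' : (x == 0) = false := by simp [hx]
      simp only [List.foldl_cons, pvStepA, hx', Bool.false_eq_true, if_false, pvEnumFrom,
        List.filter_cons]
      rw [if_pos (by simp [hx] : (((k, x) : Nat × Int).2 != 0) = true)]
      simp only [List.foldl_cons]
      have hsb : pvStepB (acc, p) (k, x) = (acc ++ [((k : Int) - p - 1, x)], (k : Int)) := rfl
      rw [hsb]
      have h := ih (k + 1) (acc ++ [((k : Int) - p - 1, x)]) (k : Int)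
      have hc : ((k + 1 : Nat) : Int) - (k : Int) - 1 = 0 := by push_cast; ring
      rw [hc] at h
      rw [h]
      simp only [Prod.mk.injEq]
      exact ⟨trivial, by push_cast [List.length_cons]; ring⟩

-- ===== VERDICT (by name: the statement is the Claim_ definition above) =====
theorem RLencode_spec : Claim_equal_RLencode := by
  intro vec _ hpre
  match vec, hpre with
  | v :: vs, _ => ?_
  unfold Spec_RLencode RLencode RLencode_alt
  have h0 : (0 : Int) = ((0 : Nat) : Int) - (-1 : Int) - 1 := by norm_num
  have := pvKey vec.dropLast 0 [] (-1)
  simp only [PySem.List.slice_to_neg_one]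
  rw [show (fun (acc : List (Int × Int) × Int) i =>
      if i == 0 then (acc.1, acc.2 + 1) else (acc.1 ++ [(acc.2, i)], 0)) = pvStepA from rfl,
     show (fun (a : List (Int × Int) × Int) q =>
      (a.1 ++ [((q.1 : Int) - a.2 - 1, q.2)], (q.1 : Int))) = pvStepB from rfl]
  rw [h0, pvKey]
  simp
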